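-- pv_equiv track=rewrite | github.com/Jmaciass1/Proyecto-Final---Intro-C.C.-Tetris- | Tetris.py | create_cuadricula
-- ===== SOURCE A (Python) =====
-- def create_cuadricula(bloqueado_pos={}):  # *
--     cuadricula = [[(0,0,0) for _ in range(10)] for _ in range(20)]
--
--     for i in range(len(cuadricula)):
--         for j in range(len(cuadricula[i])):
--             if (j, i) in bloqueado_pos:
--                 c = bloqueado_pos[(j,i)]
--                 cuadricula[i][j] = c
--     return cuadricula
-- ===== SOURCE B (Python) =====
-- def create_cuadricula(bloqueado_pos={}):
--     cuadricula = [[(0, 0, 0)] * 10 for _ in range(20)]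
--     for (j, i), c in bloqueado_pos.items():
--         if 0 <= i < 20 and 0 <= j < 10:
--             cuadricula[i][j] = c
--     return cuadricula
-- ===== Notes on version B (the rewrite author's own statement) =====
-- stated objective: simpler
-- what changed: Instead of scanning all 200 grid cells and testing each (j,i) for dict membership, B builds the default grid and makes one pass over bloqueado_pos.items(), writing each colour directly at its cell when the position is inside the 20x10 board.
import Mathlib
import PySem

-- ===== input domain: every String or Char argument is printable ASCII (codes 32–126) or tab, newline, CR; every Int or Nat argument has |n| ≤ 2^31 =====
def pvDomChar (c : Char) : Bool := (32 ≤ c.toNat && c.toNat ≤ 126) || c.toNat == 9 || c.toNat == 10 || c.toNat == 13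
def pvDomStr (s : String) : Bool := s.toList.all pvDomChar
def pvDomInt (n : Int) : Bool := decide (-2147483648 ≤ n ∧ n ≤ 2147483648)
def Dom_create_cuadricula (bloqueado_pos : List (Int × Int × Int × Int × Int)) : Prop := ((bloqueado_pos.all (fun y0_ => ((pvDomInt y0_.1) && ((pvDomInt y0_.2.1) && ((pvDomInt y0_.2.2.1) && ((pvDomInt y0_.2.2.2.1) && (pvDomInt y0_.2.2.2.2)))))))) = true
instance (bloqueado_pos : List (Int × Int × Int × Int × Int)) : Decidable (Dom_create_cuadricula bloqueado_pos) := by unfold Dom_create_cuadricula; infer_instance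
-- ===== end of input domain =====

-- B replaces A's scan of all 200 cells (with a dict-membership test per cell) by one
-- direct pass over the locked positions themselves; same return value, simpler loop.

-- ===== PORT A =====
def create_cuadricula (bloqueado_pos : List (Int × Int × Int × Int × Int)) : List (List (Int × Int × Int)) :=
  let d : PySem.Dict (Int × Int) (Int × Int × Int) :=
    PySem.Dict.ofList (bloqueado_pos.map (fun e => ((e.1, e.2.1), e.2.2)))
  let cuadricula : List (List (Int × Int × Int)) :=
    (PySem.List.pyRange 0 20 1).map (fun _ =>
      (PySem.List.pyRange 0 10 1).map (fun _ => ((0 : Int), (0 : Int), (0 : Int))))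
  (PySem.List.pyRange 0 (cuadricula.length : Int) 1).foldl (fun cuad i =>
    (PySem.List.pyRange 0 ((PySem.List.pyGetD cuad i []).length : Int) 1).foldl (fun cuad j =>
      match d.get? (j, i) with
      | some c => PySem.List.pySetD cuad i (PySem.List.pySetD (PySem.List.pyGetD cuad i []) j c)
      | none => cuad) cuad) cuadricula

-- ===== PORT B =====
def create_cuadricula_alt (bloqueado_pos : List (Int × Int × Int × Int × Int)) : List (List (Int × Int × Int)) :=
  let d : PySem.Dict (Int × Int) (Int × Int × Int) :=
    PySem.Dict.ofList (bloqueado_pos.map (fun e => ((e.1, e.2.1), e.2.2)))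
  let cuadricula : List (List (Int × Int × Int)) :=
    List.replicate 20 (List.replicate 10 ((0 : Int), (0 : Int), (0 : Int)))
  d.items.foldl (fun cuad kv =>
    if 0 ≤ kv.1.2 ∧ kv.1.2 < 20 ∧ 0 ≤ kv.1.1 ∧ kv.1.1 < 10 then
      cuad.set kv.1.2.toNat ((cuad.getD kv.1.2.toNat []).set kv.1.1.toNat kv.2)
    else cuad) cuadricula

-- ===== PRECONDITION & SPEC =====
def Spec_create_cuadricula (bloqueado_pos : List (Int × Int × Int × Int × Int)) (out : List (List (Int × Int × Int))) : Prop := out = create_cuadricula_alt bloqueado_pos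
instance (bloqueado_pos : List (Int × Int × Int × Int × Int)) (out : List (List (Int × Int × Int))) : Decidable (Spec_create_cuadricula bloqueado_pos out) := by unfold Spec_create_cuadricula; infer_instance

-- ===== CLAIM (what is proved, stated in full; the proofs are below) =====
def Claim_equal_create_cuadricula : Prop := ∀ (bloqueado_pos : List (Int × Int × Int × Int × Int)), Dom_create_cuadricula bloqueado_pos → Spec_create_cuadricula bloqueado_pos (create_cuadricula bloqueado_pos)

-- ===== LEMMAS AND PROOFS =====

-- abbreviations used only by the proofs
def pvZ : Int × Int × Int := (0, 0, 0)

def pvDict (bloqueado_pos : List (Int × Int × Int × Int × Int)) : PySem.Dict (Int × Int) (Int × Int × Int) :=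
  PySem.Dict.ofList (bloqueado_pos.map (fun e => ((e.1, e.2.1), e.2.2)))

def pvShape (g : List (List (Int × Int × Int))) : Prop :=
  g.length = 20 ∧ ∀ r ∈ g, r.length = 10

-- value A leaves in cell (i, j) (match on the dict lookup, old value kept on none)
def pvCellUpd (d : PySem.Dict (Int × Int) (Int × Int × Int)) (i j : Nat) (old : Int × Int × Int) : Int × Int × Int :=
  match d.get? ((j : Int), (i : Int)) with
  | some c => c
  | none => old

def pvRowFun (d : PySem.Dict (Int × Int) (Int × Int × Int)) (i : Nat) (r : List (Int × Int × Int)) : List (Int × Int × Int) :=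
  (List.range 10).foldl (fun r j => r.set j (pvCellUpd d i j (r.getD j pvZ))) r

-- normal form of A: a Nat-indexed set-fold over the rows
def pvAN (d : PySem.Dict (Int × Int) (Int × Int × Int)) : List (List (Int × Int × Int)) :=
  (List.range 20).foldl (fun g i => g.set i (pvRowFun d i (g.getD i [])))
    (List.replicate 20 (List.replicate 10 pvZ))

-- B's loop body
def pvBStep (g : List (List (Int × Int × Int))) (kv : (Int × Int) × (Int × Int × Int)) : List (List (Int × Int × Int)) :=
  if 0 ≤ kv.1.2 ∧ kv.1.2 < 20 ∧ 0 ≤ kv.1.1 ∧ kv.1.1 < 10 then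
    g.set kv.1.2.toNat ((g.getD kv.1.2.toNat []).set kv.1.1.toNat kv.2)
  else g

-- generic list facts ---------------------------------------------------------

theorem pv_foldl_inv {α β : Type*} (P : α → Prop) (f : α → β → α) :
    ∀ (L : List β) (a : α), P a → (∀ x b, b ∈ L → P x → P (f x b)) → P (L.foldl f a)
  | [], a, ha, _ => ha
  | b :: L, a, ha, h =>
    pv_foldl_inv P f L (f a b) (h a b (by simp) ha)
      (fun x b' hb' hx => h x b' (by simp [hb']) hx)

theorem pv_foldl_congr_inv {α β : Type*} (P : α → Prop) (f g : α → β → α) :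
    ∀ (L : List β) (a : α), P a → (∀ x b, b ∈ L → P x → P (f x b)) →
      (∀ x b, b ∈ L → P x → f x b = g x b) → L.foldl f a = L.foldl g a
  | [], _, _, _, _ => rfl
  | b :: L, a, ha, hpres, heq => by
    simp only [List.foldl_cons]
    rw [heq a b (by simp) ha]
    rw [← heq a b (by simp) ha]
    exact pv_foldl_congr_inv P f g L (f a b) (hpres a b (by simp) ha)
      (fun x b' hb' hx => hpres x b' (by simp [hb']) hx)
      (fun x b' hb' hx => heq x b' (by simp [hb']) hx)

theorem pv_getD_set_lt {β : Type*} (d0 : β) (xs : List β) (m k : Nat) (v : β)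
    (hk : k < xs.length) :
    (xs.set m v).getD k d0 = if m = k then v else xs.getD k d0 := by
  rw [List.getD_eq_getElem _ _ (by simpa using hk), List.getElem_set,
    List.getD_eq_getElem _ _ hk]

theorem pv_mem_set {β : Type*} (l : List β) (i : Nat) (v a : β) (h : a ∈ l.set i v) :
    a = v ∨ a ∈ l := by
  rcases List.mem_iff_getElem.1 h with ⟨k, hk, rfl⟩
  rw [List.getElem_set]
  split_ifs with he
  · exact Or.inl rfl
  · exact Or.inr (List.getElem_mem _)

theorem pv_getD_mem {β : Type*} (l : List β) (i : Nat) (d : β) (h : i < l.length) :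
    l.getD i d ∈ l := by
  rw [List.getD_eq_getElem _ _ h]; exact List.getElem_mem _

theorem pv_setfold_length {β : Type*} (d0 : β) (F : Nat → β → β) :
    ∀ (L : List Nat) (g : List β),
      (L.foldl (fun g x => g.set x (F x (g.getD x d0))) g).length = g.length
  | [], _ => rfl
  | x :: L, g => by
    simp only [List.foldl_cons]
    rw [pv_setfold_length d0 F L]
    exact List.length_set ..

theorem pv_setfold_getD {β : Type*} (d0 : β) (F : Nat → β → β) :
    ∀ (L : List Nat), L.Nodup → ∀ (g : List β) (k : Nat), k < g.length →
      (L.foldl (fun g x => g.set x (F x (g.getD x d0))) g).getD k d0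
        = if k ∈ L then F k (g.getD k d0) else g.getD k d0
  | [], _, g, k, _ => by simp
  | x :: L, hnd, g, k, hk => by
    simp only [List.foldl_cons]
    have hnd' := (List.nodup_cons.1 hnd).2
    have hxL := (List.nodup_cons.1 hnd).1
    rw [pv_setfold_getD d0 F L hnd' _ k (by rw [List.length_set]; exact hk)]
    by_cases hx : x = k
    · subst hx
      rw [if_neg hxL, pv_getD_set_lt d0 _ x x _ hk, if_pos rfl, if_pos (List.mem_cons_self)]
    · have hxne : k ≠ x := fun h => hx h.symm
      rw [pv_getD_set_lt d0 _ x k _ hk, if_neg hx]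
      by_cases hkL : k ∈ L <;> simp [hkL, hxne]

theorem pv_pySetD_cast {β : Type} (xs : List β) (m : Nat) (v : β) :
    PySem.List.pySetD xs (m : Int) v = xs.set m v := by simp [pysem]

theorem pv_pyGetD_cast {β : Type} (xs : List β) (m : Nat) (d : β) :
    PySem.List.pyGetD xs (m : Int) d = xs.getD m d := by simp [pysem]

-- A-side normalisation -------------------------------------------------------

-- the inner j-loop collapses to an update of row k only
theorem pv_inner_collapse (d : PySem.Dict (Int × Int) (Int × Int × Int)) (k : Nat) :
    ∀ (L : List Int) (cuad : List (List (Int × Int × Int))), k < cuad.length →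
      L.foldl (fun cuad j =>
          match d.get? (j, (k : Int)) with
          | some c => PySem.List.pySetD cuad (k : Int)
              (PySem.List.pySetD (PySem.List.pyGetD cuad (k : Int) []) j c)
          | none => cuad) cuad
        = cuad.set k (L.foldl (fun r j =>
            match d.get? (j, (k : Int)) with
            | some c => PySem.List.pySetD r j c
            | none => r) (cuad.getD k []))
  | [], cuad, hk => by
    simp only [List.foldl_nil]
    rw [List.getD_eq_getElem _ _ hk, List.set_getElem_self hk]
  | j :: L, cuad, hk => by
    simp only [List.foldl_cons]
    cases hget : d.get? (j, (k : Int)) with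
    | none =>
      dsimp only
      rw [pv_inner_collapse d k L cuad hk]
    | some c =>
      dsimp only
      rw [pv_pySetD_cast, pv_pyGetD_cast]
      rw [pv_inner_collapse d k L _ (by rw [List.length_set]; exact hk)]
      rw [pv_getD_set_lt [] _ k k _ hk, if_pos rfl, List.set_set]

-- the row-level loop over pyRange 0 10 1 is pvRowFun
theorem pv_rowfold_eq (d : PySem.Dict (Int × Int) (Int × Int × Int)) (k : Nat)
    (r : List (Int × Int × Int)) (hr : r.length = 10) :
    (PySem.List.pyRange 0 ((10 : Nat) : Int) 1).foldl (fun r j =>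
        match d.get? (j, (k : Int)) with
        | some c => PySem.List.pySetD r j c
        | none => r) r = pvRowFun d k r := by
  rw [PySem.List.pyRange_zero_nat, List.foldl_map, pvRowFun]
  refine pv_foldl_congr_inv (fun r => r.length = 10) _ _ (List.range 10) r hr ?_ ?_
  · intro x m _ hx
    cases d.get? ((m : Int), (k : Int)) <;>
      simp_all
  · intro x m hm hx
    have hm10 : m < 10 := List.mem_range.1 hm
    cases hget : d.get? ((m : Int), (k : Int)) with
    | none =>
      simp only [hget, pvCellUpd]
      rw [List.getD_eq_getElem _ _ (by omega), List.set_getElem_self (by omega)]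
    | some c => simp [hget, pvCellUpd]

theorem pv_shape_rowFun (d : PySem.Dict (Int × Int) (Int × Int × Int)) (k : Nat)
    (r : List (Int × Int × Int)) : (pvRowFun d k r).length = r.length :=
  pv_setfold_length pvZ _ (List.range 10) r

theorem pv_shape_step (d : PySem.Dict (Int × Int) (Int × Int × Int))
    (g : List (List (Int × Int × Int))) (x : Nat) (hx : x < 20) (hg : pvShape g) :
    pvShape (g.set x (pvRowFun d x (g.getD x []))) := by
  obtain ⟨hlen, hrows⟩ := hg
  refine ⟨by rw [List.length_set]; exact hlen, ?_⟩
  intro r hr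
  rcases pv_mem_set _ _ _ _ hr with rfl | hr
  · rw [pv_shape_rowFun]
    exact hrows _ (pv_getD_mem _ _ _ (by omega))
  · exact hrows _ hr

-- A's port equals the normal form
set_option maxHeartbeats 1000000 in
theorem pv_A_eq_AN (bp : List (Int × Int × Int × Int × Int)) :
    create_cuadricula bp = pvAN (pvDict bp) := by
  have hinit : ((PySem.List.pyRange 0 20 1).map (fun _ =>
      (PySem.List.pyRange 0 10 1).map (fun _ => ((0 : Int), (0 : Int), (0 : Int)))))
      = List.replicate 20 (List.replicate 10 pvZ) := by
    rw [List.map_const', List.map_const']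
    norm_num [PySem.List.length_pyRange_one, pvZ]
    decide
  simp only [create_cuadricula, pvDict]
  rw [hinit]
  rw [show (((List.replicate 20 (List.replicate 10 pvZ)).length : Nat) : Int)
        = (((20 : Nat) : Nat) : Int) by simp]
  rw [PySem.List.pyRange_zero_nat, List.foldl_map, pvAN]
  refine pv_foldl_congr_inv pvShape _ _ (List.range 20) _
    ⟨by simp, by intro r hr; rw [List.eq_of_mem_replicate hr]; simp⟩ ?_ ?_
  · -- the original body preserves the shape
    intro g k hk hg
    obtain ⟨hlen, hrows⟩ := hg
    have hk20 : k < 20 := List.mem_range.1 hk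
    have hrow : (PySem.List.pyGetD g (k : Int) []).length = 10 := by
      rw [pv_pyGetD_cast]
      exact hrows _ (pv_getD_mem _ _ _ (by omega))
    rw [hrow, pv_inner_collapse _ k _ g (by omega),
      pv_rowfold_eq _ k _ (by rw [← pv_pyGetD_cast]; exact hrow)]
    exact pv_shape_step _ g k hk20 ⟨hlen, hrows⟩
  · intro g k hk hg
    obtain ⟨hlen, hrows⟩ := hg
    have hk20 : k < 20 := List.mem_range.1 hk
    have hrow : (PySem.List.pyGetD g (k : Int) []).length = 10 := by
      rw [pv_pyGetD_cast]
      exact hrows _ (pv_getD_mem _ _ _ (by omega))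
    rw [hrow, pv_inner_collapse _ k _ g (by omega),
      pv_rowfold_eq _ k _ (by rw [← pv_pyGetD_cast]; exact hrow)]

-- cells of the normal form
theorem pv_AN_cell (d : PySem.Dict (Int × Int) (Int × Int × Int)) (i j : Nat)
    (hi : i < 20) (hj : j < 10) :
    ((pvAN d).getD i []).getD j pvZ = pvCellUpd d i j pvZ := by
  rw [pvAN, pv_setfold_getD [] _ (List.range 20) (List.nodup_range) _ i (by simpa using hi),
    if_pos (List.mem_range.2 hi)]
  have hrep : ((List.replicate 20 (List.replicate 10 pvZ)).getD i ([] : List (Int × Int × Int)))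
      = List.replicate 10 pvZ := by
    rw [List.getD_eq_getElem _ _ (by simpa using hi)]
    exact List.getElem_replicate ..
  rw [hrep, pvRowFun,
    pv_setfold_getD pvZ _ (List.range 10) (List.nodup_range) _ j (by simpa using hj),
    if_pos (List.mem_range.2 hj)]
  rw [List.getD_eq_getElem _ _ (by simpa using hj), List.getElem_replicate]

theorem pv_AN_shape (d : PySem.Dict (Int × Int) (Int × Int × Int)) : pvShape (pvAN d) := by
  rw [pvAN]
  refine pv_foldl_inv pvShape _ (List.range 20) _
    ⟨by simp, by intro r hr; rw [List.eq_of_mem_replicate hr]; simp⟩ ?_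
  intro g x hx hg
  exact pv_shape_step d g x (List.mem_range.1 hx) hg

-- B-side ---------------------------------------------------------------------

theorem pv_bstep_shape (g : List (List (Int × Int × Int))) (kv : (Int × Int) × (Int × Int × Int))
    (hg : pvShape g) : pvShape (pvBStep g kv) := by
  rw [pvBStep]
  split_ifs with h
  · obtain ⟨hlen, hrows⟩ := hg
    refine ⟨by rw [List.length_set]; exact hlen, ?_⟩
    intro r hr
    rcases pv_mem_set _ _ _ _ hr with rfl | hr
    · rw [List.length_set]
      exact hrows _ (pv_getD_mem _ _ _ (by omega))
    · exact hrows _ hr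
  · exact hg

theorem pv_B_fold_cell :
    ∀ (l : List ((Int × Int) × (Int × Int × Int))), (l.map (·.1)).Nodup →
      ∀ (g : List (List (Int × Int × Int))), pvShape g → ∀ (i j : Nat), i < 20 → j < 10 →
        ((l.foldl pvBStep g).getD i []).getD j pvZ
          = match l.find? (fun e => e.1 == ((j : Int), (i : Int))) with
            | some e => e.2
            | none => (g.getD i []).getD j pvZ
  | [], _, g, _, i, j, _, _ => by simp
  | e :: l, hnd, g, hg, i, j, hi, hj => by
    simp only [List.map_cons, List.nodup_cons] at hnd
    obtain ⟨hhead, htail⟩ := hnd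
    obtain ⟨hlen20, hrows⟩ := hg
    simp only [List.foldl_cons]
    by_cases hkey : e.1 = ((j : Int), (i : Int))
    · rw [List.find?_cons_of_pos (by simp [hkey])]
      have hguard : 0 ≤ e.1.2 ∧ e.1.2 < 20 ∧ 0 ≤ e.1.1 ∧ e.1.1 < 10 := by
        rw [hkey]
        refine ⟨?_, ?_, ?_, ?_⟩ <;> simp <;> omega
      have hstep : pvBStep g e = g.set i ((g.getD i []).set j e.2) := by
        rw [pvBStep, if_pos hguard, hkey]
        simp
      have hnone : l.find? (fun e => e.1 == ((j : Int), (i : Int))) = none := by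
        refine List.find?_eq_none.2 ?_
        intro x hx
        simp only [beq_iff_eq]
        intro hx1
        apply hhead
        rw [hkey, ← hx1]
        exact List.mem_map_of_mem hx
      rw [hstep,
        pv_B_fold_cell l htail _ (by
          have := pv_bstep_shape g e ⟨hlen20, hrows⟩
          rwa [hstep] at this) i j hi hj,
        hnone]
      have hrow : (g.getD i ([] : List (Int × Int × Int))).length = 10 :=
        hrows _ (pv_getD_mem _ _ _ (by omega))
      rw [pv_getD_set_lt [] _ i i _ (by omega), if_pos rfl,
        pv_getD_set_lt pvZ _ j j _ (by omega), if_pos rfl]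
    · rw [List.find?_cons_of_neg (by simpa using hkey)]
      have hcell : ((pvBStep g e).getD i []).getD j pvZ = (g.getD i []).getD j pvZ := by
        rw [pvBStep]
        split_ifs with h
        · by_cases hrowi : e.1.2.toNat = i
          · have hie : e.1.2 = (i : Int) := by omega
            have hje : e.1.1.toNat ≠ j := by
              intro hje
              exact hkey (Prod.ext (by omega) hie)
            have hrow : (g.getD i ([] : List (Int × Int × Int))).length = 10 :=
              hrows _ (pv_getD_mem _ _ _ (by omega))
            rw [hrowi, pv_getD_set_lt [] _ i i _ (by omega), if_pos rfl,
              pv_getD_set_lt pvZ _ _ j _ (by omega), if_neg hje]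
          · rw [pv_getD_set_lt [] _ _ i _ (by omega), if_neg hrowi]
        · rfl
      rw [pv_B_fold_cell l htail _ (pv_bstep_shape g e ⟨hlen20, hrows⟩) i j hi hj, hcell]

theorem pv_B_shape (l : List ((Int × Int) × (Int × Int × Int)))
    (g : List (List (Int × Int × Int))) (hg : pvShape g) : pvShape (l.foldl pvBStep g) :=
  pv_foldl_inv pvShape pvBStep l g hg (fun x b _ hx => pv_bstep_shape x b hx)

theorem pv_B_eq_fold (bp : List (Int × Int × Int × Int × Int)) :
    create_cuadricula_alt bp
      = (pvDict bp).items.foldl pvBStep (List.replicate 20 (List.replicate 10 pvZ)) := rfl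

-- the dict lookup is find? on the items
theorem pv_get?_eq_find? (d : PySem.Dict (Int × Int) (Int × Int × Int)) (k : Int × Int) :
    d.get? k = (d.items.find? (fun e => e.1 == k)).map (·.2) := rfl

-- final assembly --------------------------------------------------------------

theorem pv_ext_getD {β : Type} (d0 : β) (l l' : List β) (hlen : l.length = l'.length)
    (h : ∀ k, k < l.length → l.getD k d0 = l'.getD k d0) : l = l' := by
  apply List.ext_getElem hlen
  intro k hk hk'
  have hgd := h k hk
  rwa [List.getD_eq_getElem _ _ hk, List.getD_eq_getElem _ _ hk'] at hgd

set_option maxHeartbeats 1000000 in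
theorem pv_A_eq_B (bp : List (Int × Int × Int × Int × Int)) :
    create_cuadricula bp = create_cuadricula_alt bp := by
  rw [pv_A_eq_AN, pv_B_eq_fold]
  have hAshape := pv_AN_shape (pvDict bp)
  have hBshape := pv_B_shape (pvDict bp).items (List.replicate 20 (List.replicate 10 pvZ))
    ⟨by simp, by intro r hr; rw [List.eq_of_mem_replicate hr]; simp⟩
  have hnd : ((pvDict bp).items.map (·.1)).Nodup := PySem.Dict.nodup_keys_ofList _
  apply pv_ext_getD ([] : List (Int × Int × Int)) _ _ (by rw [hAshape.1, hBshape.1])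
  intro i hi
  have hi20 : i < 20 := by rw [hAshape.1] at hi; exact hi
  have hrowA : ((pvAN (pvDict bp)).getD i ([] : List (Int × Int × Int))).length = 10 :=
    hAshape.2 _ (pv_getD_mem _ _ _ (by omega))
  have hrowB : (((pvDict bp).items.foldl pvBStep
      (List.replicate 20 (List.replicate 10 pvZ))).getD i ([] : List (Int × Int × Int))).length = 10 :=
    hBshape.2 _ (pv_getD_mem _ _ _ (by rw [hBshape.1]; exact hi20))
  apply pv_ext_getD pvZ _ _ (by rw [hrowA, hrowB])
  intro j hj
  have hj10 : j < 10 := by rw [hrowA] at hj; exact hj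
  have hrep : ((List.replicate 20 (List.replicate 10 pvZ)).getD i
      ([] : List (Int × Int × Int))).getD j pvZ = pvZ := by
    have h1 : (List.replicate 20 (List.replicate 10 pvZ)).getD i ([] : List (Int × Int × Int))
        = List.replicate 10 pvZ := by
      rw [List.getD_eq_getElem _ _ (by simpa using hi20)]
      exact List.getElem_replicate ..
    rw [h1, List.getD_eq_getElem _ _ (by simpa using hj10)]
    exact List.getElem_replicate ..
  rw [pv_AN_cell (pvDict bp) i j hi20 hj10,
    pv_B_fold_cell (pvDict bp).items hnd (List.replicate 20 (List.replicate 10 pvZ))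
      ⟨by simp, by intro r hr; rw [List.eq_of_mem_replicate hr]; simp⟩ i j hi20 hj10,
    hrep, pvCellUpd, pv_get?_eq_find?]
  cases (pvDict bp).items.find? (fun e => e.1 == ((j : Int), (i : Int))) <;> rfl

-- ===== VERDICT (by name: the statement is the Claim_ definition above) =====
theorem create_cuadricula_spec : Claim_equal_create_cuadricula := by
  intro bp _
  unfold Spec_create_cuadricula
  exact pv_A_eq_B bp
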